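-- pv_equiv track=rewrite | github.com/udonehn/Algorithm | 백준/Gold/1202. 보석 도둑/보석 도둑.py | solve
-- ===== SOURCE A (Python) =====
-- from heapq import heappop, heappush
--
-- def solve(N, K, gems, knapsack):
--     result = 0
--     knapsack.sort()
--     gems.sort()
--
--     heap = []
--     index = 0
--     for bag in knapsack:
--         while index < N and gems[index][0] <= bag:
--             heappush(heap, (-gems[index][1], gems[index][0]))
--             index+=1
--         if heap:
--             value = -heappop(heap)[0]
--             result+=value
--
--     return result
-- ===== SOURCE B (Python) =====
-- def solve(N, K, gems, knapsack):
--     knapsack.sort()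
--     gems.sort()
--     order = sorted(gems[:max(N, 0)], key=lambda g: (-g[1], g[0]))
--     caps = list(knapsack)
--     total = 0
--     for w, v in order:
--         lo, hi = 0, len(caps)
--         while lo < hi:
--             mid = (lo + hi) // 2
--             if caps[mid] < w:
--                 lo = mid + 1
--             else:
--                 hi = mid
--         if lo < len(caps):
--             del caps[lo]
--             total += v
--     return total
-- ===== Notes on version B (the rewrite author's own statement) =====
-- stated objective: alternative
-- what changed: A scans bags in ascending order, feeding a value max-heap from a weight-sorted pointer and popping the best gem per bag; B inverts the traversal: it sorts the considered gems by descending value (ties: lighter first) and for each gem binary-searches the sorted remaining capacities for the smallest one that fits, deleting it — no heap, no pointer.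
-- crash fix: On inputs with N > len(gems) where the knapsack is nonempty and every gem's weight fits the largest bag, A raises IndexError (gems[index] at index = len(gems)); B returns the greedy total. — e.g. on solve(2, 1, [(1, 7)], [2]): A raises IndexError, B returns 7
import Mathlib
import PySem

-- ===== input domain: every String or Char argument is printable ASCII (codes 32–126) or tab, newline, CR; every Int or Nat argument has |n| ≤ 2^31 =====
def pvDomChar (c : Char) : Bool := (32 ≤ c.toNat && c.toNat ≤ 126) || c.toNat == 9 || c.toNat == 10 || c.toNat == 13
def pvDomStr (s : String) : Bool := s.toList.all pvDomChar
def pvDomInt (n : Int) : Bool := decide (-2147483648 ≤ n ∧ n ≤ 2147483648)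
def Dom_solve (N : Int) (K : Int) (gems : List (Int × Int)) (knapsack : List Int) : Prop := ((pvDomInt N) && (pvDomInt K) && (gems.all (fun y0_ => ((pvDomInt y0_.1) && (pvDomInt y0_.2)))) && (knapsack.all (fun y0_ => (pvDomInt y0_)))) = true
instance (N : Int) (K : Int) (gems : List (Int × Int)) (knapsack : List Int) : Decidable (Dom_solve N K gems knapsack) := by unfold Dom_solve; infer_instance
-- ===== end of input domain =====

-- B changes the traversal: instead of A's heap greedy over bags, B walks the gems in
-- descending value order and removes the smallest sufficient capacity; return values agree,
-- and B performs the same in-place sorts of `gems` and `knapsack` that A does (the proved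
-- equivalence is about the return value).

-- ===== PORT A =====

-- Python tuple comparison `a < b` on pairs of ints (lexicographic).
def pyPairLt (a b : Int × Int) : Bool := a.1 < b.1 || (a.1 == b.1 && a.2 < b.2)

-- heap[i] (all accesses below are in range in the Python; default never read on its runs)
def hget (l : List (Int × Int)) (i : Nat) : Int × Int := l.getD i (0, 0)

-- hand port of CPython heapq._siftdown, step for step (exact: same comparisons, same writes;
-- the final `heap[pos] = newitem` write is the base case).
def siftdown (heap : List (Int × Int)) (startpos pos : Nat) (newitem : Int × Int) : List (Int × Int) :=
  if _h : startpos < pos then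
    let parentpos := (pos - 1) / 2
    let parent := hget heap parentpos
    if pyPairLt newitem parent then siftdown (heap.set pos parent) startpos parentpos newitem
    else heap.set pos newitem
  else heap.set pos newitem
termination_by pos
decreasing_by omega

-- hand port of the descend loop of CPython heapq._siftup (exact: same child choice, same writes)
def siftupLoop (heap : List (Int × Int)) (pos : Nat) : List (Int × Int) × Nat :=
  if _h : 2 * pos + 1 < heap.length then
    let childpos := 2 * pos + 1
    let childpos := if childpos + 1 < heap.length && !pyPairLt (hget heap childpos) (hget heap (childpos + 1)) then childpos + 1 else childpos
    siftupLoop (heap.set pos (hget heap childpos)) childpos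
  else (heap, pos)
termination_by heap.length - pos
decreasing_by
  simp only [List.length_set]
  split
  · rename_i hc
    simp only [Bool.and_eq_true, decide_eq_true_eq] at hc
    omega
  · omega

-- hand port of CPython heapq._siftup (exact): move the hole to a leaf, then _siftdown back up
def siftup (heap : List (Int × Int)) (pos : Nat) : List (Int × Int) :=
  let newitem := hget heap pos
  let r := siftupLoop heap pos
  siftdown r.1 pos r.2 newitem

-- hand port of CPython heapq.heappush (exact)
def heappush (heap : List (Int × Int)) (item : Int × Int) : List (Int × Int) :=
  siftdown (heap ++ [item]) 0 heap.length item

-- hand port of CPython heapq.heappop (exact; in A it is only called on a nonempty heap)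
def heappop (heap : List (Int × Int)) : (Int × Int) × List (Int × Int) :=
  let lastelt := heap.getLastD (0, 0)
  let rest := heap.dropLast
  match rest with
  | [] => (lastelt, [])
  | r0 :: _ => (r0, siftup (rest.set 0 lastelt) 0)

-- the inner `while index < N and gems[index][0] <= bag` loop of A
def pushLoop (N : Int) (gems : List (Int × Int)) (bag : Int) (heap : List (Int × Int)) (index : Int) : List (Int × Int) × Int :=
  if _h : index < N then
    match PySem.List.pyGet? gems index with
    | some g =>
        if g.1 ≤ bag then pushLoop N gems bag (heappush heap (-g.2, g.1)) (index + 1)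
        else (heap, index)
    | none => (heap, index)  -- Python raises IndexError here; such inputs are outside Pre_solve
  else (heap, index)
termination_by (N - index).toNat
decreasing_by omega

-- the body of A's `for bag in knapsack` loop
def stepA (N : Int) (gems : List (Int × Int)) (st : Int × List (Int × Int) × Int) (bag : Int) : Int × List (Int × Int) × Int :=
  let r := pushLoop N gems bag st.2.1 st.2.2
  if r.1.isEmpty then (st.1, r.1, r.2)
  else
    let p := heappop r.1
    (st.1 + (-p.1.1), p.2, r.2)

def solve (N : Int) (K : Int) (gems : List (Int × Int)) (knapsack : List Int) : Int :=
  let knapsackS := PySem.List.sorted knapsack (fun x => x)                       -- knapsack.sort()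
  let gemsS := PySem.List.sorted2 gems (fun g => g.1) (fun g => g.2)            -- gems.sort()
  (knapsackS.foldl (stepA N gemsS) ((0 : Int), ([] : List (Int × Int)), (0 : Int))).1

-- ===== PORT B =====

-- Source B's hand-written binary search: first index lo in the sorted caps with caps[lo] ≥ w
-- (fuel = hi - lo at the call site makes the while loop structural; it never runs out)
def bsLoop (caps : List Int) (w : Int) (fuel lo hi : Nat) : Nat :=
  match fuel with
  | 0 => lo
  | fuel + 1 =>
    if lo < hi then
      let mid := (lo + hi) / 2
      if caps.getD mid 0 < w then bsLoop caps w fuel (mid + 1) hi else bsLoop caps w fuel lo mid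
    else lo

-- the body of Source B's `for w, v in order` loop: binary search, then `del caps[lo]`
def stepB (st : Int × List Int) (g : Int × Int) : Int × List Int :=
  let lo := bsLoop st.2 g.1 st.2.length 0 st.2.length
  if lo < st.2.length then (st.1 + g.2, st.2.eraseIdx lo) else st

def solve_alt (N : Int) (K : Int) (gems : List (Int × Int)) (knapsack : List Int) : Int :=
  let knapsackS := PySem.List.sorted knapsack (fun x => x)                       -- knapsack.sort()
  let gemsS := PySem.List.sorted2 gems (fun g => g.1) (fun g => g.2)            -- gems.sort()
  let order := PySem.List.sorted2 (PySem.List.slice gemsS none (some (max N 0))) (fun g => -g.2) (fun g => g.1)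
  (order.foldl stepB ((0 : Int), knapsackS)).1

-- ===== PRECONDITION & SPEC =====

-- Pre_solve excludes exactly the inputs on which the Python A raises IndexError:
-- those where N exceeds len(gems) and the while loop consumes all gems (every gem fits
-- some bag), so that gems[index] is evaluated at index = len(gems).
def Pre_solve (N : Int) (K : Int) (gems : List (Int × Int)) (knapsack : List Int) : Prop :=
  N ≤ gems.length ∨ knapsack = [] ∨ ∃ g ∈ gems, ∀ b ∈ knapsack, b < g.1

instance (N : Int) (K : Int) (gems : List (Int × Int)) (knapsack : List Int) : Decidable (Pre_solve N K gems knapsack) := by unfold Pre_solve; infer_instance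

def pvWitness_solve : Int × Int × (List (Int × Int)) × List Int := (2, 1, [(1, 10), (3, 5)], [2])

-- On inputs where N > len(gems), the knapsack is nonempty and every gem fits the largest bag,
-- A raises IndexError while B returns the greedy total.
def Raises_solve (N : Int) (K : Int) (gems : List (Int × Int)) (knapsack : List Int) : Prop :=
  gems.length < N ∧ knapsack ≠ [] ∧ ∀ g ∈ gems, ∃ b ∈ knapsack, g.1 ≤ b

instance (N : Int) (K : Int) (gems : List (Int × Int)) (knapsack : List Int) : Decidable (Raises_solve N K gems knapsack) := by unfold Raises_solve; infer_instance

def pvRaiseWitness_solve : Int × Int × (List (Int × Int)) × List Int := (2, 1, [(1, 7)], [2])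
def pvRaiseWitnessOut_solve : Int := 7

def Spec_solve (N : Int) (K : Int) (gems : List (Int × Int)) (knapsack : List Int) (out : Int) : Prop := out = solve_alt N K gems knapsack
instance (N : Int) (K : Int) (gems : List (Int × Int)) (knapsack : List Int) (out : Int) : Decidable (Spec_solve N K gems knapsack out) := by unfold Spec_solve; infer_instance

-- ===== CLAIM (what is proved, stated in full; the proofs are below) =====
def Claim_equal_solve : Prop := ∀ (N : Int) (K : Int) (gems : List (Int × Int)) (knapsack : List Int), Dom_solve N K gems knapsack → Pre_solve N K gems knapsack → Spec_solve N K gems knapsack (solve N K gems knapsack)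

def Claim_raises_solve : Prop := (∀ (N : Int) (K : Int) (gems : List (Int × Int)) (knapsack : List Int), Dom_solve N K gems knapsack → Raises_solve N K gems knapsack → ¬ Pre_solve N K gems knapsack) ∧ (Dom_solve (pvRaiseWitness_solve.1) (pvRaiseWitness_solve.2.1) (pvRaiseWitness_solve.2.2.1) (pvRaiseWitness_solve.2.2.2) ∧ Raises_solve (pvRaiseWitness_solve.1) (pvRaiseWitness_solve.2.1) (pvRaiseWitness_solve.2.2.1) (pvRaiseWitness_solve.2.2.2) ∧ solve_alt (pvRaiseWitness_solve.1) (pvRaiseWitness_solve.2.1) (pvRaiseWitness_solve.2.2.1) (pvRaiseWitness_solve.2.2.2) = pvRaiseWitnessOut_solve)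

-- ===== LEMMAS AND PROOFS =====

-- ---- facts about the Python pair order ----

lemma plt_irrefl (a : Int × Int) : pyPairLt a a = false := by
  simp [pyPairLt]

lemma plt_asymm {a b : Int × Int} (h : pyPairLt a b = true) : pyPairLt b a = false := by
  rcases a with ⟨a1, a2⟩; rcases b with ⟨b1, b2⟩
  simp only [pyPairLt, Bool.or_eq_true, Bool.and_eq_true, decide_eq_true_eq, beq_iff_eq,
    Bool.or_eq_false_iff, Bool.and_eq_false_iff, decide_eq_false_iff_not, beq_eq_false_iff_ne] at *
  omega

lemma nplt_trans {a b c : Int × Int} (h1 : pyPairLt b a = false) (h2 : pyPairLt c b = false) :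
    pyPairLt c a = false := by
  rcases a with ⟨a1, a2⟩; rcases b with ⟨b1, b2⟩; rcases c with ⟨c1, c2⟩
  simp only [pyPairLt, Bool.or_eq_false_iff, Bool.and_eq_false_iff, decide_eq_false_iff_not,
    beq_eq_false_iff_ne, ne_eq] at *
  constructor <;> omega

lemma nplt_antisymm {a b : Int × Int} (h1 : pyPairLt a b = false) (h2 : pyPairLt b a = false) :
    a = b := by
  rcases a with ⟨a1, a2⟩; rcases b with ⟨b1, b2⟩
  simp only [pyPairLt, Bool.or_eq_false_iff, Bool.and_eq_false_iff, decide_eq_false_iff_not,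
    beq_eq_false_iff_ne, ne_eq, Prod.mk.injEq] at *
  omega

lemma nplt_of_nplt_of_plt {s x pv : Int × Int} (h1 : pyPairLt s pv = false)
    (h2 : pyPairLt x pv = true) : pyPairLt s x = false := by
  rcases s with ⟨a1, a2⟩; rcases x with ⟨b1, b2⟩; rcases pv with ⟨c1, c2⟩
  simp only [pyPairLt, Bool.or_eq_true, Bool.and_eq_true, decide_eq_true_eq, beq_iff_eq,
    Bool.or_eq_false_iff, Bool.and_eq_false_iff, decide_eq_false_iff_not, beq_eq_false_iff_ne,
    ne_eq] at *
  constructor <;> omega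

-- ---- list utilities ----

lemma hget_set_self {l : List (Int × Int)} {i : Nat} (h : i < l.length) (v : Int × Int) :
    hget (l.set i v) i = v := by
  unfold hget
  rw [List.getD_eq_getElem _ _ (by simpa using h)]
  exact List.getElem_set_self _

lemma hget_set_ne {l : List (Int × Int)} {i j : Nat} (h : i ≠ j) (v : Int × Int) :
    hget (l.set i v) j = hget l j := by
  unfold hget
  by_cases hj : j < l.length
  · rw [List.getD_eq_getElem _ _ (by simpa using hj), List.getD_eq_getElem _ _ hj]
    exact List.getElem_set_ne h _
  · rw [List.getD_eq_default _ _ (by simp; omega), List.getD_eq_default _ _ (by omega)]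

lemma count_set {l : List (Int × Int)} {i : Nat} (h : i < l.length) (v a : Int × Int) :
    (l.set i v).count a + (if l[i] = a then 1 else 0) = l.count a + (if v = a then 1 else 0) := by
  conv_rhs => rw [show l = l.take i ++ l.drop i from (List.take_append_drop i l).symm,
    List.drop_eq_getElem_cons h]
  rw [List.set_eq_take_append_cons_drop, if_pos h]
  simp only [List.count_append, List.count_cons]
  by_cases h1 : l[i] = a <;> by_cases h2 : v = a <;>
    simp [h1, h2, beq_iff_eq] <;> omega

lemma hget_eq_getElem {l : List (Int × Int)} {i : Nat} (h : i < l.length) : hget l i = l[i] :=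
  List.getD_eq_getElem _ _ h

lemma set_set_perm (l : List (Int × Int)) {i j : Nat} (x : Int × Int) (hij : i ≠ j)
    (hi : i < l.length) (hj : j < l.length) :
    ((l.set i (hget l j)).set j x).Perm (l.set i x) := by
  have hg : hget l j = l[j] := hget_eq_getElem hj
  rw [hg, List.perm_iff_count]
  intro a
  have hj' : j < (l.set i l[j]).length := by simpa using hj
  have e1 := count_set (l := l.set i l[j]) (i := j) hj' x a
  have e2 := count_set (l := l) (i := i) hi l[j] a
  have e3 := count_set (l := l) (i := i) hi x a
  have hgj : (l.set i l[j])[j] = l[j] := List.getElem_set_ne hij _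
  rw [hgj] at e1
  by_cases h1 : l[j] = a <;> by_cases h2 : x = a <;> by_cases h3 : l[i] = a <;>
    simp [h1, h2, h3] at e1 e2 e3 ⊢ <;> omega

lemma set_append_last (l : List (Int × Int)) (x y : Int × Int) :
    (l ++ [x]).set l.length y = l ++ [y] := by
  induction l with
  | nil => rfl
  | cons a t ih => simp [ih]

-- ---- heap invariants ----

def IsHeap (l : List (Int × Int)) : Prop :=
  ∀ i j : Nat, j < l.length → (j = 2 * i + 1 ∨ j = 2 * i + 2) →
    pyPairLt (hget l j) (hget l i) = false

def HeapX (l : List (Int × Int)) (pos : Nat) : Prop :=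
  ∀ i j : Nat, j < l.length → (j = 2 * i + 1 ∨ j = 2 * i + 2) → i ≠ pos → j ≠ pos →
    pyPairLt (hget l j) (hget l i) = false

def ChildOK (l : List (Int × Int)) (pos : Nat) (x : Int × Int) : Prop :=
  ∀ j : Nat, j < l.length → (j = 2 * pos + 1 ∨ j = 2 * pos + 2) →
    pyPairLt (hget l j) x = false

def BridgeOK (l : List (Int × Int)) (pos : Nat) : Prop :=
  pos ≠ 0 → ∀ j : Nat, j < l.length → (j = 2 * pos + 1 ∨ j = 2 * pos + 2) →
    pyPairLt (hget l j) (hget l ((pos - 1) / 2)) = false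

lemma child_parent {i j pos : Nat} (hc : j = 2 * i + 1 ∨ j = 2 * i + 2) (hj : j = pos)
    (h0 : 0 < pos) : i = (pos - 1) / 2 := by omega

lemma siftdown_spec : ∀ pos (l : List (Int × Int)) (x : Int × Int), pos < l.length →
    HeapX l pos → ChildOK l pos x → BridgeOK l pos →
    IsHeap (siftdown l 0 pos x) ∧ (siftdown l 0 pos x).Perm (l.set pos x) := by
  intro pos
  induction pos using Nat.strong_induction_on with
  | _ pos IH =>
    intro l x hlen hX hC hB
    rw [siftdown]
    by_cases h0 : 0 < pos
    · rw [dif_pos h0]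
      simp only []
      have hppos : (pos - 1) / 2 < pos := by omega
      have hplen : (pos - 1) / 2 < l.length := by omega
      by_cases hcmp : pyPairLt x (hget l ((pos - 1) / 2)) = true
      · rw [if_pos hcmp]
        have hpl : (pos - 1) / 2 < (l.set pos (hget l ((pos - 1) / 2))).length := by
          simpa using hplen
        have hrec := IH ((pos - 1) / 2) hppos (l.set pos (hget l ((pos - 1) / 2))) x hpl ?hx ?hc ?hb
        case hx =>
          intro i j hj hc hip hjp
          rw [List.length_set] at hj
          by_cases hipos : i = pos
          · subst i
            rw [hget_set_self hlen, hget_set_ne (show pos ≠ j by omega)]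
            exact hB (by omega) j hj hc
          · by_cases hjpos : j = pos
            · exact absurd (child_parent hc hjpos h0) hip
            · rw [hget_set_ne (show pos ≠ j from fun h => hjpos h.symm),
                hget_set_ne (show pos ≠ i from fun h => hipos h.symm)]
              exact hX i j hj hc hipos hjpos
        case hc =>
          intro j hj hc
          rw [List.length_set] at hj
          by_cases hjpos : j = pos
          · subst j
            rw [hget_set_self hlen]
            exact plt_asymm hcmp
          · rw [hget_set_ne (show pos ≠ j from fun h => hjpos h.symm)]
            have hs : pyPairLt (hget l j) (hget l ((pos - 1) / 2)) = false :=
              hX ((pos - 1) / 2) j hj hc (by omega) hjpos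
            exact nplt_of_nplt_of_plt hs hcmp
        case hb =>
          intro hpne j hj hc
          rw [List.length_set] at hj
          rw [hget_set_ne (show pos ≠ ((pos - 1) / 2 - 1) / 2 by omega)]
          by_cases hjpos : j = pos
          · subst j
            rw [hget_set_self hlen]
            exact hX (((pos - 1) / 2 - 1) / 2) ((pos - 1) / 2) hplen (by omega) (by omega) (by omega)
          · rw [hget_set_ne (show pos ≠ j from fun h => hjpos h.symm)]
            have h1 : pyPairLt (hget l j) (hget l ((pos - 1) / 2)) = false :=
              hX ((pos - 1) / 2) j hj hc (by omega) hjpos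
            have h2 : pyPairLt (hget l ((pos - 1) / 2)) (hget l (((pos - 1) / 2 - 1) / 2)) = false :=
              hX (((pos - 1) / 2 - 1) / 2) ((pos - 1) / 2) hplen (by omega) (by omega) (by omega)
            exact nplt_trans h2 h1
        refine ⟨hrec.1, hrec.2.trans ?_⟩
        exact set_set_perm l x (by omega) hlen hplen
      · rw [if_neg hcmp]
        refine ⟨?_, List.Perm.refl _⟩
        intro i j hj hc
        rw [List.length_set] at hj
        by_cases hipos : i = pos
        · subst i
          rw [hget_set_self hlen, hget_set_ne (by omega : pos ≠ j)]
          exact hC j hj hc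
        · by_cases hjpos : j = pos
          · have hip : i = (pos - 1) / 2 := child_parent hc hjpos h0
            subst j
            rw [hget_set_self hlen, hget_set_ne (show pos ≠ i from fun h => hipos h.symm), hip]
            exact eq_false_of_ne_true hcmp
          · rw [hget_set_ne (show pos ≠ j from fun h => hjpos h.symm),
              hget_set_ne (show pos ≠ i from fun h => hipos h.symm)]
            exact hX i j hj hc hipos hjpos
    · rw [dif_neg h0]
      have hpos : pos = 0 := by omega
      subst hpos
      refine ⟨?_, List.Perm.refl _⟩
      intro i j hj hc
      rw [List.length_set] at hj
      by_cases hipos : i = 0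
      · subst i
        rw [hget_set_self hlen, hget_set_ne (by omega : (0:Nat) ≠ j)]
        exact hC j hj hc
      · rw [hget_set_ne (by omega : (0:Nat) ≠ j), hget_set_ne (show (0:Nat) ≠ i from fun h => hipos h.symm)]
        exact hX i j hj hc hipos (by omega)

lemma heap_root_min {l : List (Int × Int)} (hH : IsHeap l) :
    ∀ i, i < l.length → pyPairLt (hget l i) (hget l 0) = false := by
  intro i
  induction i using Nat.strong_induction_on with
  | _ i IH =>
    intro hi
    rcases Nat.eq_zero_or_pos i with h0 | h0
    · subst h0; exact plt_irrefl _
    · have hedge : pyPairLt (hget l i) (hget l ((i - 1) / 2)) = false :=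
        hH ((i - 1) / 2) i hi (by omega)
      have hp : pyPairLt (hget l ((i - 1) / 2)) (hget l 0) = false :=
        IH ((i - 1) / 2) (by omega) (by omega)
      exact nplt_trans hp hedge

lemma sift_step {l : List (Int × Int)} {pos c : Nat} (hlen : pos < l.length)
    (hX : HeapX l pos) (hB : BridgeOK l pos) (hcl : c < l.length)
    (hcc : c = 2 * pos + 1 ∨ c = 2 * pos + 2)
    (hmc : ∀ s, s < l.length → (s = 2 * pos + 1 ∨ s = 2 * pos + 2) →
      pyPairLt (hget l s) (hget l c) = false) :
    HeapX (l.set pos (hget l c)) c ∧ BridgeOK (l.set pos (hget l c)) c := by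
  constructor
  · intro i j hj hc hic hjc
    rw [List.length_set] at hj
    by_cases hip : i = pos
    · subst i
      rw [hget_set_self hlen, hget_set_ne (show pos ≠ j by omega)]
      exact hmc j hj hc
    · by_cases hjp : j = pos
      · subst j
        have h0 : 0 < pos := by omega
        have hi : i = (pos - 1) / 2 := by omega
        rw [hget_set_self hlen, hget_set_ne (show pos ≠ i by omega), hi]
        exact hB (by omega) c hcl hcc
      · rw [hget_set_ne (show pos ≠ j from fun h => hjp h.symm),
          hget_set_ne (show pos ≠ i from fun h => hip h.symm)]
        exact hX i j hj hc hip hjp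
  · intro _hc0 j hj hc
    rw [List.length_set] at hj
    have hcp : (c - 1) / 2 = pos := by omega
    rw [hcp, hget_set_self hlen, hget_set_ne (show pos ≠ j by omega)]
    exact hX c j hj hc (by omega) (by omega)

lemma siftupLoop_go : ∀ (fuel : Nat) (l : List (Int × Int)) (pos : Nat),
    l.length ≤ fuel + pos → pos < l.length → HeapX l pos → BridgeOK l pos →
    (siftupLoop l pos).1.length = l.length ∧ (siftupLoop l pos).2 < l.length ∧
    ¬ (2 * (siftupLoop l pos).2 + 1 < l.length) ∧
    HeapX (siftupLoop l pos).1 (siftupLoop l pos).2 ∧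
    BridgeOK (siftupLoop l pos).1 (siftupLoop l pos).2 ∧
    ∀ y, ((siftupLoop l pos).1.set (siftupLoop l pos).2 y).Perm (l.set pos y) := by
  intro fuel
  induction fuel with
  | zero => intro l pos hf hlen _ _; omega
  | succ n IH =>
    intro l pos hf hlen hX hB
    by_cases hlt : 2 * pos + 1 < l.length
    · rw [siftupLoop, dif_pos hlt]
      simp only []
      by_cases hch : (decide (2 * pos + 1 + 1 < l.length) && !pyPairLt (hget l (2 * pos + 1)) (hget l (2 * pos + 1 + 1))) = true
      · rw [if_pos hch]
        simp only [Bool.and_eq_true, decide_eq_true_eq, Bool.not_eq_eq_eq_not, Bool.not_true] at hch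
        obtain ⟨hr, hcmp⟩ := hch
        have hstep := sift_step hlen hX hB (c := 2 * pos + 2) (by omega) (by omega) ?mc
        case mc =>
          intro s hs hsc
          rcases hsc with h | h <;> subst h
          · exact hcmp
          · exact plt_irrefl _
        have hrec := IH (l.set pos (hget l (2 * pos + 2))) (2 * pos + 2)
          (by simp only [List.length_set]; omega) (by simp only [List.length_set]; omega)
          hstep.1 hstep.2
        simp only [List.length_set] at hrec
        refine ⟨hrec.1, hrec.2.1, hrec.2.2.1, hrec.2.2.2.1, hrec.2.2.2.2.1, fun y => ?_⟩
        exact (hrec.2.2.2.2.2 y).trans (set_set_perm l y (by omega) hlen (by omega))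
      · rw [if_neg hch]
        simp only [Bool.and_eq_true, decide_eq_true_eq, Bool.not_eq_eq_eq_not, Bool.not_true,
          not_and] at hch
        have hstep := sift_step hlen hX hB (c := 2 * pos + 1) (by omega) (by omega) ?mc
        case mc =>
          intro s hs hsc
          rcases hsc with h | h <;> subst h
          · exact plt_irrefl _
          · have := hch (by omega)
            have hT : pyPairLt (hget l (2 * pos + 1)) (hget l (2 * pos + 2)) = true := by
              revert this
              cases hb : pyPairLt (hget l (2 * pos + 1)) (hget l (2 * pos + 2)) <;> simp
            have : (2 : Nat) * pos + 1 + 1 = 2 * pos + 2 := by omega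
            exact plt_asymm hT
        have hrec := IH (l.set pos (hget l (2 * pos + 1))) (2 * pos + 1)
          (by simp only [List.length_set]; omega) (by simp only [List.length_set]; omega)
          hstep.1 hstep.2
        simp only [List.length_set] at hrec
        refine ⟨hrec.1, hrec.2.1, hrec.2.2.1, hrec.2.2.2.1, hrec.2.2.2.2.1, fun y => ?_⟩
        exact (hrec.2.2.2.2.2 y).trans (set_set_perm l y (by omega) hlen (by omega))
    · rw [siftupLoop, dif_neg hlt]
      exact ⟨rfl, hlen, hlt, hX, hB, fun y => List.Perm.refl _⟩

lemma siftupLoop_spec (l : List (Int × Int)) (pos : Nat) (hlen : pos < l.length)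
    (hX : HeapX l pos) (hB : BridgeOK l pos) :
    (siftupLoop l pos).1.length = l.length ∧ (siftupLoop l pos).2 < l.length ∧
    ¬ (2 * (siftupLoop l pos).2 + 1 < l.length) ∧
    HeapX (siftupLoop l pos).1 (siftupLoop l pos).2 ∧
    BridgeOK (siftupLoop l pos).1 (siftupLoop l pos).2 ∧
    ∀ y, ((siftupLoop l pos).1.set (siftupLoop l pos).2 y).Perm (l.set pos y) :=
  siftupLoop_go l.length l pos (by omega) hlen hX hB

lemma hget_append {l l' : List (Int × Int)} {k : Nat} (h : k < l.length) :
    hget (l ++ l') k = hget l k := by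
  unfold hget
  rw [List.getD_eq_getElem _ _ (by simp; omega), List.getD_eq_getElem _ _ h]
  exact List.getElem_append_left h

lemma heappush_spec {h : List (Int × Int)} (hH : IsHeap h) (x : Int × Int) :
    IsHeap (heappush h x) ∧ (heappush h x).Perm (x :: h) := by
  unfold heappush
  have hs := siftdown_spec h.length (h ++ [x]) x (by simp) ?hx ?hc ?hb
  case hx =>
    intro i j hj hc hip hjp
    simp only [List.length_append, List.length_singleton] at hj
    have hjl : j < h.length := by omega
    have hil : i < h.length := by omega
    rw [hget_append hjl, hget_append hil]
    exact hH i j hjl hc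
  case hc => intro j hj hc; simp only [List.length_append, List.length_singleton] at hj; omega
  case hb => intro _ j hj hc; simp only [List.length_append, List.length_singleton] at hj; omega
  refine ⟨hs.1, hs.2.trans ?_⟩
  rw [set_append_last]
  exact List.perm_append_singleton x h

lemma siftup_spec {l : List (Int × Int)} (hlen : 0 < l.length) (hX : HeapX l 0) :
    IsHeap (siftup l 0) ∧ (siftup l 0).Perm l := by
  unfold siftup
  simp only []
  have hsu := siftupLoop_spec l 0 hlen hX (by intro h0; omega)
  obtain ⟨hL, hp2, hnc, hX2, hB2, hperm⟩ := hsu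
  have hsd := siftdown_spec (siftupLoop l 0).2 (siftupLoop l 0).1 (hget l 0)
    (by omega) hX2 ?hc hB2
  case hc => intro j hj hc; rw [hL] at hj; omega
  refine ⟨hsd.1, hsd.2.trans ?_⟩
  have := hperm (hget l 0)
  refine this.trans ?_
  have : l.set 0 (hget l 0) = l := by
    have h0 : (0 : Nat) < l.length := hlen
    conv_lhs => rw [show hget l 0 = l[0] from hget_eq_getElem h0]
    exact List.set_getElem_self h0
  rw [this]

lemma hget_dropLast {h : List (Int × Int)} {k : Nat} (hk : k < h.dropLast.length) :
    hget h.dropLast k = hget h k := by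
  unfold hget
  rw [List.getD_eq_getElem _ _ hk, List.getD_eq_getElem _ _ (by simp at hk; omega)]
  exact List.getElem_dropLast _

lemma heappop_spec {h : List (Int × Int)} (hH : IsHeap h) (hne : h ≠ []) :
    (heappop h).1 = hget h 0 ∧ ((hget h 0) :: (heappop h).2).Perm h ∧ IsHeap (heappop h).2 := by
  cases hrest : h.dropLast with
  | nil =>
    have hpop : heappop h = (h.getLastD (0, 0), []) := by
      unfold heappop; rw [hrest]
    have hlen : h.length = 1 := by
      have := congrArg List.length hrest
      simp only [List.length_dropLast, List.length_nil] at this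
      have hpos : 0 < h.length := List.length_pos_iff.mpr hne
      omega
    obtain ⟨a, ha⟩ : ∃ a, h = [a] := List.length_eq_one_iff.mp hlen
    subst ha
    rw [hpop]
    refine ⟨by simp [hget], by simp [hget], by intro i j hj hc; simp at hj⟩
  | cons r0 rt =>
    have hpop : heappop h = (r0, siftup ((r0 :: rt).set 0 (h.getLastD (0, 0))) 0) := by
      unfold heappop; rw [hrest]
    have hlen2 : 2 ≤ h.length := by
      have := congrArg List.length hrest
      simp only [List.length_dropLast, List.length_cons] at this
      have hpos : 0 < h.length := List.length_pos_iff.mpr hne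
      omega
    have hdl : (0 : Nat) < h.dropLast.length := by rw [hrest]; simp
    have hr0 : r0 = hget h 0 := by
      have := hget_dropLast (h := h) (k := 0) hdl
      rw [hrest] at this
      rw [← this]
      simp [hget]
    have hlast : h.getLastD (0, 0) = h.getLast hne := by
      rw [List.getLastD_eq_getLast?, List.getLast?_eq_some_getLast hne]
      rfl
    have hXr : HeapX ((r0 :: rt).set 0 (h.getLastD (0, 0))) 0 := by
      intro i j hj hc hip hjp
      rw [← hrest] at hj ⊢
      rw [hget_set_ne (show (0:Nat) ≠ j from fun hh => hjp hh.symm),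
        hget_set_ne (show (0:Nat) ≠ i from fun hh => hip hh.symm)]
      rw [List.length_set] at hj
      have hilen : i < h.dropLast.length := by rcases hc with hcc | hcc <;> omega
      rw [hget_dropLast hj, hget_dropLast hilen]
      exact hH i j (by simp at hj; omega) hc
    have hsu := siftup_spec (l := (r0 :: rt).set 0 (h.getLastD (0, 0))) (by simp) hXr
    rw [hpop]
    refine ⟨hr0, ?_, hsu.1⟩
    have hset : ((r0 :: rt).set 0 (h.getLastD (0, 0))) = h.getLastD (0, 0) :: rt := by simp
    have hsplit : (r0 :: rt) ++ [h.getLast hne] = h := by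
      conv_rhs => rw [← List.dropLast_append_getLast hne, hrest]
    refine (List.Perm.cons _ (hsu.2.trans (by rw [hset]))).trans ?_
    rw [← hr0, hlast]
    have hp : (r0 :: h.getLast hne :: rt).Perm ((r0 :: rt) ++ [h.getLast hne]) :=
      List.Perm.cons _ (List.perm_append_singleton _ _).symm
    rw [hsplit] at hp
    exact hp

-- ---- the abstract pool model of A's loop ----

def key (g : Int × Int) : Int × Int := (-g.2, g.1)

lemma key_inj : Function.Injective key := by
  intro a b h
  simp only [key, Prod.mk.injEq] at h
  exact Prod.ext (h.2) (by omega)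

lemma nplt_of_plt_ge {x m a : Int × Int} (h1 : pyPairLt x m = false) (h2 : pyPairLt x a = true) :
    pyPairLt a m = false := by
  rcases x with ⟨x1, x2⟩; rcases m with ⟨m1, m2⟩; rcases a with ⟨a1, a2⟩
  simp only [pyPairLt, Bool.or_eq_true, Bool.and_eq_true, decide_eq_true_eq, beq_iff_eq,
    Bool.or_eq_false_iff, Bool.and_eq_false_iff, decide_eq_false_iff_not, beq_eq_false_iff_ne,
    ne_eq] at *
  constructor <;> omega

def kleMin? (p : List (Int × Int)) : Option (Int × Int) :=
  match p with
  | [] => none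
  | a :: t => some (t.foldl (fun m x => if pyPairLt (key x) (key m) then x else m) a)

lemma kleMin_foldl_spec : ∀ (t : List (Int × Int)) (a : Int × Int),
    (t.foldl (fun m x => if pyPairLt (key x) (key m) then x else m) a) ∈ a :: t ∧
    ∀ x ∈ a :: t, pyPairLt (key x)
      (key (t.foldl (fun m x => if pyPairLt (key x) (key m) then x else m) a)) = false := by
  intro t
  induction t with
  | nil => intro a; exact ⟨List.mem_singleton.mpr rfl, by intro x hx; simp at hx; subst hx; exact plt_irrefl _⟩
  | cons b t IH =>
    intro a
    simp only [List.foldl_cons]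
    by_cases hcmp : pyPairLt (key b) (key a) = true
    · rw [if_pos hcmp]
      obtain ⟨hmem, hmin⟩ := IH b
      refine ⟨?_, ?_⟩
      · rcases List.mem_cons.mp hmem with h | h
        · rw [h]; exact List.mem_cons_of_mem _ List.mem_cons_self
        · exact List.mem_cons_of_mem _ (List.mem_cons_of_mem _ h)
      · intro x hx
        rcases List.mem_cons.mp hx with h | h
        · rw [h]
          exact nplt_of_plt_ge (hmin b List.mem_cons_self) hcmp
        · exact hmin x h
    · rw [if_neg hcmp]
      rw [Bool.not_eq_true] at hcmp
      obtain ⟨hmem, hmin⟩ := IH a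
      refine ⟨?_, ?_⟩
      · rcases List.mem_cons.mp hmem with h | h
        · rw [h]; exact List.mem_cons_self
        · exact List.mem_cons_of_mem _ (List.mem_cons_of_mem _ h)
      · intro x hx
        rcases List.mem_cons.mp hx with h | h
        · rw [h]; exact hmin a List.mem_cons_self
        · rcases List.mem_cons.mp h with h' | h'
          · rw [h']
            exact nplt_trans (hmin a List.mem_cons_self) hcmp
          · exact hmin x (List.mem_cons_of_mem _ h')

lemma kleMin?_spec {p : List (Int × Int)} {m : Int × Int} (h : kleMin? p = some m) :
    m ∈ p ∧ ∀ x ∈ p, pyPairLt (key x) (key m) = false := by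
  match p with
  | [] => simp [kleMin?] at h
  | a :: t =>
    simp only [kleMin?, Option.some.injEq] at h
    subst h
    exact kleMin_foldl_spec t a

lemma kleMin?_eq_none_iff {p : List (Int × Int)} : kleMin? p = none ↔ p = [] := by
  cases p <;> simp [kleMin?]

lemma kleMin?_eq_of_perm {p q : List (Int × Int)} (h : p.Perm q) : kleMin? p = kleMin? q := by
  cases hp : kleMin? p with
  | none =>
    rw [kleMin?_eq_none_iff] at hp
    subst hp
    have : q = [] := h.nil_eq.symm
    simp [this, kleMin?]
  | some m =>
    cases hq : kleMin? q with
    | none =>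
      rw [kleMin?_eq_none_iff] at hq
      subst hq
      rw [kleMin?_eq_none_iff.mpr h.eq_nil] at hp
      simp at hp
    | some m' =>
      obtain ⟨hm, hmin⟩ := kleMin?_spec hp
      obtain ⟨hm', hmin'⟩ := kleMin?_spec hq
      have h1 : pyPairLt (key m') (key m) = false := hmin m' (h.mem_iff.mpr hm')
      have h2 : pyPairLt (key m) (key m') = false := hmin' m (h.mem_iff.mp hm)
      have := nplt_antisymm h2 h1
      rw [key_inj this]

def stepM (st : Int × List (Int × Int) × List (Int × Int)) (bag : Int) :
    Int × List (Int × Int) × List (Int × Int) :=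
  let pool := st.2.1 ++ st.2.2.takeWhile (fun g => decide (g.1 ≤ bag))
  let s := st.2.2.dropWhile (fun g => decide (g.1 ≤ bag))
  match kleMin? pool with
  | none => (st.1, pool, s)
  | some m => (st.1 + m.2, pool.erase m, s)

def runM (res : Int) (pool s : List (Int × Int)) (bags : List Int) : Int :=
  (bags.foldl stepM (res, pool, s)).1

lemma pop_min_match {heap pool : List (Int × Int)} (hperm : heap.Perm (pool.map key))
    (hH : IsHeap heap) {m : Int × Int} (hm : kleMin? pool = some m) (hne : heap ≠ []) :
    hget heap 0 = key m := by
  have hlen : 0 < heap.length := List.length_pos_iff.mpr hne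
  have hroot_mem : hget heap 0 ∈ heap := by
    rw [hget_eq_getElem hlen]; exact List.getElem_mem _
  have hroot_min : ∀ y ∈ heap, pyPairLt y (hget heap 0) = false := by
    intro y hy
    obtain ⟨i, hi, rfl⟩ := List.mem_iff_getElem.mp hy
    rw [← hget_eq_getElem hi]
    exact heap_root_min hH i hi
  obtain ⟨hmmem, hmin⟩ := kleMin?_spec hm
  obtain ⟨g0, hg0, hg0e⟩ := List.mem_map.mp (hperm.mem_iff.mp hroot_mem)
  have h1 : pyPairLt (key m) (hget heap 0) = false :=
    hroot_min _ (hperm.mem_iff.mpr (List.mem_map_of_mem hmmem))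
  have h2 : pyPairLt (hget heap 0) (key m) = false := by
    rw [← hg0e]; exact hmin g0 hg0
  exact nplt_antisymm h2 h1

lemma pushLoop_corr (N : Int) (gemsS : List (Int × Int)) (bag : Int) :
    ∀ (s : List (Int × Int)) (heap pool : List (Int × Int)) (index : Int),
    0 ≤ index → s = (gemsS.take (max N 0).toNat).drop index.toNat →
    heap.Perm (pool.map key) → IsHeap heap →
    0 ≤ (pushLoop N gemsS bag heap index).2 ∧
    (gemsS.take (max N 0).toNat).drop (pushLoop N gemsS bag heap index).2.toNat
      = s.dropWhile (fun g => decide (g.1 ≤ bag)) ∧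
    (pushLoop N gemsS bag heap index).1.Perm
      ((pool ++ s.takeWhile (fun g => decide (g.1 ≤ bag))).map key) ∧
    IsHeap (pushLoop N gemsS bag heap index).1 := by
  have hmax : (max N 0).toNat = N.toNat := by
    rcases le_total N 0 with h | h
    · rw [max_eq_right h]; omega
    · rw [max_eq_left h]
  intro s
  induction s with
  | nil =>
    intro heap pool index h0 hs hperm hH
    have hiN : (gemsS.take (max N 0).toNat).length ≤ index.toNat :=
      List.drop_eq_nil_iff.mp hs.symm
    have hend : pushLoop N gemsS bag heap index = (heap, index) := by
      rw [pushLoop]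
      by_cases hN : index < N
      · rw [dif_pos hN]
        have hlen : gemsS.length ≤ index.toNat := by
          simp only [List.length_take] at hiN
          omega
        have hnone : PySem.List.pyGet? gemsS index = none := by
          rw [← Int.toNat_of_nonneg h0, PySem.List.pyGet?_natCast]
          exact List.getElem?_eq_none hlen
        rw [hnone]
      · rw [dif_neg hN]
    rw [hend]
    exact ⟨h0, hs ▸ rfl, by simpa using hperm, hH⟩
  | cons g s' IH =>
    intro heap pool index h0 hs hperm hH
    have hiN : index.toNat < (gemsS.take (max N 0).toNat).length := by
      by_contra hcon
      have hnil : (gemsS.take (max N 0).toNat).drop index.toNat = [] :=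
        List.drop_eq_nil_of_le (by omega)
      rw [hnil] at hs
      exact List.cons_ne_nil _ _ hs
    have hdec : g :: s' = (gemsS.take (max N 0).toNat)[index.toNat] ::
        (gemsS.take (max N 0).toNat).drop (index.toNat + 1) :=
      hs.trans (List.drop_eq_getElem_cons hiN)
    obtain ⟨hg, hs'⟩ := List.cons_eq_cons.mp hdec
    have hlt : index < N := by
      simp only [List.length_take] at hiN
      omega
    have hgemlen : index.toNat < gemsS.length := by
      simp only [List.length_take] at hiN
      omega
    have hget' : PySem.List.pyGet? gemsS index = some g := by
      rw [← Int.toNat_of_nonneg h0, PySem.List.pyGet?_natCast]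
      rw [List.getElem?_eq_getElem hgemlen]
      rw [hg, List.getElem_take]
    have heq : pushLoop N gemsS bag heap index =
        if g.1 ≤ bag then pushLoop N gemsS bag (heappush heap (-g.2, g.1)) (index + 1)
        else (heap, index) := by
      conv_lhs => rw [pushLoop]
      rw [dif_pos hlt, hget']
    rw [heq]
    by_cases hbag : g.1 ≤ bag
    · rw [if_pos hbag]
      have hpush := heappush_spec hH (-g.2, g.1)
      have hrec := IH (heappush heap (-g.2, g.1)) (pool ++ [g]) (index + 1)
        (by omega)
        (by rw [hs', show (index + 1).toNat = index.toNat + 1 by omega])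
        (by
          refine (hpush.2.trans (List.Perm.cons _ hperm)).trans ?_
          have hmap : (pool ++ [g]).map key = pool.map key ++ [key g] := by simp
          rw [hmap]
          exact (List.perm_append_singleton (key g) (pool.map key)).symm)
        hpush.1
      refine ⟨hrec.1, ?_, ?_, hrec.2.2.2⟩
      · rw [List.dropWhile_cons_of_pos (by simp [hbag])]
        exact hrec.2.1
      · rw [List.takeWhile_cons_of_pos (by simp [hbag])]
        refine hrec.2.2.1.trans ?_
        conv_rhs => rw [List.append_cons]
    · rw [if_neg hbag]
      refine ⟨h0, ?_, ?_, hH⟩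
      · rw [List.dropWhile_cons_of_neg (by simp [hbag])]
        exact hs.symm
      · rw [List.takeWhile_cons_of_neg (by simp [hbag]), List.append_nil]
        exact hperm

lemma foldA_eq_runM (N : Int) (gemsS : List (Int × Int)) :
    ∀ (bags : List Int) (res : Int) (heap pool : List (Int × Int)) (index : Int)
      (s : List (Int × Int)),
    0 ≤ index → s = (gemsS.take (max N 0).toNat).drop index.toNat →
    heap.Perm (pool.map key) → IsHeap heap →
    (bags.foldl (stepA N gemsS) (res, heap, index)).1 = runM res pool s bags := by
  intro bags
  induction bags with
  | nil => intro res heap pool index s _ _ _ _; rfl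
  | cons bag bags IH =>
    intro res heap pool index s h0 hs hperm hH
    simp only [List.foldl_cons, runM, stepM]
    have hpc := pushLoop_corr N gemsS bag s heap pool index h0 hs hperm hH
    obtain ⟨hr0, hrdrop, hrperm, hrH⟩ := hpc
    set r := pushLoop N gemsS bag heap index with hr
    simp only [stepA, ← hr]
    by_cases hemp : r.1.isEmpty
    · rw [if_pos hemp]
      have hrnil : r.1 = [] := List.isEmpty_iff.mp hemp
      have hpool : pool ++ s.takeWhile (fun g => decide (g.1 ≤ bag)) = [] := by
        have := hrperm
        rw [hrnil] at this
        have := this.symm.eq_nil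
        exact List.map_eq_nil_iff.mp this
      rw [hpool]
      have : kleMin? ([] : List (Int × Int)) = none := rfl
      rw [this]
      exact IH res r.1 [] r.2 _ hr0 hrdrop.symm (by rw [hrnil]; exact List.Perm.refl _) hrH
    · rw [if_neg hemp]
      have hrne : r.1 ≠ [] := by
        intro hcon; rw [hcon] at hemp; simp at hemp
      have hpoolne : pool ++ s.takeWhile (fun g => decide (g.1 ≤ bag)) ≠ [] := by
        intro hcon
        rw [hcon] at hrperm
        simp only [List.map_nil] at hrperm
        exact hrne hrperm.eq_nil
      obtain ⟨m, hm⟩ : ∃ m, kleMin? (pool ++ s.takeWhile (fun g => decide (g.1 ≤ bag))) = some m := by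
        cases hk : kleMin? (pool ++ s.takeWhile (fun g => decide (g.1 ≤ bag))) with
        | none => exact absurd (kleMin?_eq_none_iff.mp hk) hpoolne
        | some m => exact ⟨m, rfl⟩
      rw [hm]
      have hpop := heappop_spec hrH hrne
      have hroot : hget r.1 0 = key m := pop_min_match hrperm hrH hm hrne
      have hval : (heappop r.1).1 = key m := by rw [hpop.1, hroot]
      have hres : res + (-(heappop r.1).1.1) = res + m.2 := by
        rw [hval]; simp [key]
      rw [hres]
      refine IH _ _ _ _ _ hr0 hrdrop.symm ?_ hpop.2.2
      -- (heappop r.1).2 ~ (pool₂.erase m).map key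
      have h1 : (key m :: (heappop r.1).2).Perm
          ((pool ++ s.takeWhile (fun g => decide (g.1 ≤ bag))).map key) := by
        have := hpop.2.1
        rw [hroot] at this
        exact this.trans hrperm
      have h2 : ((pool ++ s.takeWhile (fun g => decide (g.1 ≤ bag))).map key).Perm
          (key m :: ((pool ++ s.takeWhile (fun g => decide (g.1 ≤ bag))).erase m).map key) := by
        have hmm : m ∈ pool ++ s.takeWhile (fun g => decide (g.1 ≤ bag)) := (kleMin?_spec hm).1
        rw [List.map_erase key_inj]
        exact List.perm_cons_erase (List.mem_map_of_mem hmm)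
      exact (h1.trans h2).cons_inv

-- ---- the B-side recursion and exchange argument ----

-- "remove the first capacity ≥ w" — the effect of B's binary-search step on a sorted list
def takeCap (w : Int) (caps : List Int) : Option (List Int) :=
  match caps with
  | [] => none
  | c :: rest => if w ≤ c then some rest else (takeCap w rest).map (fun l => c :: l)

def runB (os : List (Int × Int)) (caps : List Int) : Int :=
  match os with
  | [] => 0
  | g :: rest =>
    match takeCap g.1 caps with
    | some caps' => g.2 + runB rest caps'
    | none => runB rest caps

lemma takeCap_sublist : ∀ (caps : List Int) (w : Int) (caps' : List Int),
    takeCap w caps = some caps' → caps'.Sublist caps := by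
  intro caps
  induction caps with
  | nil => intro w caps' h; simp [takeCap] at h
  | cons c rest IH =>
    intro w caps' h
    by_cases hc : w ≤ c
    · simp only [takeCap, if_pos hc, Option.some.injEq] at h
      rw [← h]
      exact List.sublist_cons_self _ _
    · simp only [takeCap, if_neg hc, Option.map_eq_some_iff] at h
      obtain ⟨l, hl, hcons⟩ := h
      rw [← hcons]
      exact (IH w l hl).cons₂ c

lemma pairwise_getElem_mono {caps : List Int} (hsort : caps.Pairwise (· ≤ ·)) {i j : Nat}
    (hij : i ≤ j) (hj : j < caps.length) : caps[i]'(by omega) ≤ caps[j] := by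
  rcases Nat.eq_or_lt_of_le hij with h | h
  · subst h; exact le_refl _
  · exact List.pairwise_iff_getElem.mp hsort i j (by omega) hj h

lemma bsLoop_spec (caps : List Int) (w : Int) (hsort : caps.Pairwise (· ≤ ·)) :
    ∀ (fuel lo hi : Nat), hi - lo ≤ fuel → lo ≤ hi → hi ≤ caps.length →
    (∀ i, i < lo → (h : i < caps.length) → caps[i] < w) →
    (∀ i, hi ≤ i → (h : i < caps.length) → w ≤ caps[i]) →
    bsLoop caps w fuel lo hi ≤ caps.length ∧
    (∀ i, i < bsLoop caps w fuel lo hi → (h : i < caps.length) → caps[i] < w) ∧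
    (∀ i, bsLoop caps w fuel lo hi ≤ i → (h : i < caps.length) → w ≤ caps[i]) := by
  intro fuel
  induction fuel with
  | zero =>
    intro lo hi hf hlh hhl hlow hhigh
    have hlohi : lo = hi := by omega
    subst hlohi
    simp only [bsLoop]
    exact ⟨by omega, hlow, hhigh⟩
  | succ n IH =>
    intro lo hi hf hlh hhl hlow hhigh
    have hstep : bsLoop caps w (n + 1) lo hi =
        if lo < hi then
          (if caps.getD ((lo + hi) / 2) 0 < w then bsLoop caps w n ((lo + hi) / 2 + 1) hi
           else bsLoop caps w n lo ((lo + hi) / 2))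
        else lo := rfl
    rw [hstep]
    by_cases hlt : lo < hi
    · rw [if_pos hlt]
      have hmid : (lo + hi) / 2 < caps.length := by omega
      rw [List.getD_eq_getElem _ _ hmid]
      by_cases hc : caps[(lo + hi) / 2] < w
      · rw [if_pos hc]
        refine IH ((lo + hi) / 2 + 1) hi (by omega) (by omega) hhl ?_ hhigh
        intro i hi' h
        by_cases hilo : i < lo
        · exact hlow i hilo h
        · calc caps[i] ≤ caps[(lo + hi) / 2] := pairwise_getElem_mono hsort (by omega) hmid
            _ < w := hc
      · rw [if_neg hc]
        refine IH lo ((lo + hi) / 2) (by omega) (by omega) (by omega) hlow ?_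
        intro i hi' h
        calc w ≤ caps[(lo + hi) / 2] := by omega
          _ ≤ caps[i] := pairwise_getElem_mono hsort hi' h
    · rw [if_neg hlt]
      exact ⟨by omega, hlow, fun i hi' h => hhigh i (by omega) h⟩

lemma first_ge_eq_takeCap : ∀ (caps : List Int) (w : Int) (r : Nat),
    r ≤ caps.length → (∀ i, i < r → (h : i < caps.length) → caps[i] < w) →
    (∀ i, r ≤ i → (h : i < caps.length) → w ≤ caps[i]) →
    (if r < caps.length then some (caps.eraseIdx r) else none) = takeCap w caps := by
  intro caps
  induction caps with
  | nil =>
    intro w r hr _ _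
    rw [if_neg (by simp)]
    rfl
  | cons c rest IH =>
    intro w r hr hlow hhigh
    cases r with
    | zero =>
      have hwc : w ≤ c := hhigh 0 (by omega) (by simp)
      rw [if_pos (by simp)]
      simp only [List.eraseIdx_cons_zero, takeCap, if_pos hwc]
    | succ r' =>
      have hcw : c < w := hlow 0 (by omega) (by simp)
      have hrec := IH w r' (by simp at hr; omega)
        (fun i hi h => by
          have := hlow (i + 1) (by omega) (by simp; omega)
          simpa using this)
        (fun i hi h => by
          have := hhigh (i + 1) (by omega) (by simp; omega)
          simpa using this)
      simp only [takeCap, if_neg (by omega : ¬ w ≤ c)]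
      rw [← hrec]
      by_cases hlen : r' < rest.length
      · rw [if_pos hlen, if_pos (by simp; omega)]
        simp [List.eraseIdx_cons_succ]
      · rw [if_neg hlen, if_neg (by simp; omega)]
        rfl

lemma stepB_eq_takeCap (caps : List Int) (g : Int × Int) (acc : Int)
    (hsort : caps.Pairwise (· ≤ ·)) :
    stepB (acc, caps) g = (match takeCap g.1 caps with
      | some caps' => (acc + g.2, caps')
      | none => (acc, caps)) := by
  have hbs := bsLoop_spec caps g.1 hsort caps.length 0 caps.length (by omega) (by omega)
    (le_refl _) (by omega) (by intro i hi h; omega)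
  have hbr := first_ge_eq_takeCap caps g.1 (bsLoop caps g.1 caps.length 0 caps.length)
    hbs.1 hbs.2.1 hbs.2.2
  simp only [stepB]
  by_cases hlen : bsLoop caps g.1 caps.length 0 caps.length < caps.length
  · rw [if_pos hlen] at hbr ⊢
    rw [← hbr]
  · rw [if_neg hlen] at hbr ⊢
    rw [← hbr]

lemma foldB_eq_runB : ∀ (os : List (Int × Int)) (caps : List Int) (acc : Int),
    caps.Pairwise (· ≤ ·) → (os.foldl stepB (acc, caps)).1 = acc + runB os caps := by
  intro os
  induction os with
  | nil => intro caps acc _; simp [runB]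
  | cons g rest IH =>
    intro caps acc hsort
    simp only [List.foldl_cons, runB]
    rw [stepB_eq_takeCap caps g acc hsort]
    cases htc : takeCap g.1 caps with
    | some caps' =>
      dsimp only
      rw [IH caps' (acc + g.2)
        (List.Pairwise.sublist (takeCap_sublist caps g.1 caps' htc) hsort)]
      omega
    | none => dsimp only; rw [IH caps acc hsort]

lemma runM_add : ∀ (bags : List Int) (res : Int) (pool s : List (Int × Int)),
    runM res pool s bags = res + runM 0 pool s bags := by
  intro bags
  induction bags with
  | nil => intro res pool s; simp [runM]
  | cons bag bags IH =>
    intro res pool s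
    simp only [runM, List.foldl_cons, stepM]
    cases hk : kleMin? (pool ++ s.takeWhile (fun g => decide (g.1 ≤ bag))) with
    | none =>
      dsimp only
      exact IH res _ _
    | some m =>
      dsimp only
      rw [← runM, ← runM, IH, IH (0 + m.2)]
      omega

lemma runM_congr : ∀ (bags : List Int) (res : Int) (pool pool' s : List (Int × Int)),
    pool.Perm pool' → runM res pool s bags = runM res pool' s bags := by
  intro bags
  induction bags with
  | nil => intro res pool pool' s _; rfl
  | cons bag bags IH =>
    intro res pool pool' s hperm
    simp only [runM, List.foldl_cons, stepM]
    have hp2 : (pool ++ s.takeWhile (fun g => decide (g.1 ≤ bag))).Perm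
        (pool' ++ s.takeWhile (fun g => decide (g.1 ≤ bag))) := hperm.append_right _
    rw [kleMin?_eq_of_perm hp2]
    cases hk : kleMin? (pool' ++ s.takeWhile (fun g => decide (g.1 ≤ bag))) with
    | none => exact IH _ _ _ _ hp2
    | some m => exact IH _ _ _ _ (hp2.erase m)

-- erase of a gem not yet reachable commutes with one consuming step
lemma tw_erase_lt : ∀ (s : List (Int × Int)) (g : Int × Int) (bag : Int),
    s.Pairwise (fun x y => x.1 ≤ y.1) → g ∈ s → bag < g.1 →
    (s.erase g).takeWhile (fun x => decide (x.1 ≤ bag)) = s.takeWhile (fun x => decide (x.1 ≤ bag)) ∧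
    (s.erase g).dropWhile (fun x => decide (x.1 ≤ bag)) = (s.dropWhile (fun x => decide (x.1 ≤ bag))).erase g ∧
    g ∈ s.dropWhile (fun x => decide (x.1 ≤ bag)) := by
  intro s
  induction s with
  | nil => intro g bag _ hmem; simp at hmem
  | cons a t IH =>
    intro g bag hsort hmem hgt
    by_cases hag : a = g
    · subst hag
      have hpa : (decide (a.1 ≤ bag)) = false := by simp; omega
      have htw : t.takeWhile (fun x => decide (x.1 ≤ bag)) = [] := by
        cases t with
        | nil => rfl
        | cons b t' =>
          have hb : a.1 ≤ b.1 := (List.pairwise_cons.mp hsort).1 b List.mem_cons_self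
          rw [List.takeWhile_cons_of_neg (by simp; omega)]
      have hdw : t.dropWhile (fun x => decide (x.1 ≤ bag)) = t := by
        cases t with
        | nil => rfl
        | cons b t' =>
          have hb : a.1 ≤ b.1 := (List.pairwise_cons.mp hsort).1 b List.mem_cons_self
          rw [List.dropWhile_cons_of_neg (by simp; omega)]
      rw [List.erase_cons_head, List.takeWhile_cons_of_neg (by simpa using hpa),
        List.dropWhile_cons_of_neg (by simpa using hpa), List.erase_cons_head]
      exact ⟨htw, hdw.symm ▸ rfl, List.mem_cons_self⟩
    · have hmem' : g ∈ t := by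
        rcases List.mem_cons.mp hmem with h | h
        · exact absurd h.symm hag
        · exact h
      have hsort' : t.Pairwise (fun x y => x.1 ≤ y.1) := (List.pairwise_cons.mp hsort).2
      have herase : (a :: t).erase g = a :: t.erase g := by
        rw [List.erase_cons_tail]
        simp [hag]
      obtain ⟨h1, h2, h3⟩ := IH g bag hsort' hmem' hgt
      by_cases hpa : a.1 ≤ bag
      · rw [herase, List.takeWhile_cons_of_pos (by simpa using hpa),
          List.takeWhile_cons_of_pos (by simpa using hpa),
          List.dropWhile_cons_of_pos (by simpa using hpa),
          List.dropWhile_cons_of_pos (by simpa using hpa)]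
        exact ⟨by rw [h1], h2, h3⟩
      · rw [herase, List.takeWhile_cons_of_neg (by simpa using hpa),
          List.takeWhile_cons_of_neg (by simpa using hpa),
          List.dropWhile_cons_of_neg (by simpa using hpa),
          List.dropWhile_cons_of_neg (by simpa using hpa)]
        refine ⟨rfl, ?_, hmem⟩
        rw [List.erase_cons_tail]
        simp [hag]

-- erase of a reachable gem happens inside the consumed prefix
lemma tw_erase_le : ∀ (s : List (Int × Int)) (g : Int × Int) (bag : Int),
    s.Pairwise (fun x y => x.1 ≤ y.1) → g ∈ s → g.1 ≤ bag →
    g ∈ s.takeWhile (fun x => decide (x.1 ≤ bag)) ∧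
    (s.erase g).takeWhile (fun x => decide (x.1 ≤ bag)) = (s.takeWhile (fun x => decide (x.1 ≤ bag))).erase g ∧
    (s.erase g).dropWhile (fun x => decide (x.1 ≤ bag)) = s.dropWhile (fun x => decide (x.1 ≤ bag)) := by
  intro s
  induction s with
  | nil => intro g bag _ hmem; simp at hmem
  | cons a t IH =>
    intro g bag hsort hmem hle
    by_cases hag : a = g
    · subst hag
      rw [List.erase_cons_head, List.takeWhile_cons_of_pos (by simpa using hle),
        List.dropWhile_cons_of_pos (by simpa using hle), List.erase_cons_head]
      exact ⟨List.mem_cons_self, rfl, rfl⟩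
    · have hmem' : g ∈ t := by
        rcases List.mem_cons.mp hmem with h | h
        · exact absurd h.symm hag
        · exact h
      have hsort' : t.Pairwise (fun x y => x.1 ≤ y.1) := (List.pairwise_cons.mp hsort).2
      have hpa : a.1 ≤ bag := by
        have := (List.pairwise_cons.mp hsort).1 g hmem'
        omega
      have herase : (a :: t).erase g = a :: t.erase g := by
        rw [List.erase_cons_tail]
        simp [hag]
      obtain ⟨h1, h2, h3⟩ := IH g bag hsort' hmem' hle
      rw [herase, List.takeWhile_cons_of_pos (by simpa using hpa),
        List.takeWhile_cons_of_pos (by simpa using hpa),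
        List.dropWhile_cons_of_pos (by simpa using hpa),
        List.dropWhile_cons_of_pos (by simpa using hpa)]
      refine ⟨List.mem_cons_of_mem _ h1, ?_, h3⟩
      rw [h2, List.erase_cons_tail]
      simp [hag]

lemma takeWhile_append_all {p : (Int × Int) → Bool} : ∀ (pre s : List (Int × Int)),
    (∀ x ∈ pre, p x = true) →
    (pre ++ s).takeWhile p = pre ++ s.takeWhile p ∧ (pre ++ s).dropWhile p = s.dropWhile p := by
  intro pre
  induction pre with
  | nil => intro s _; simp
  | cons a t IH =>
    intro s hall
    have hpa : p a = true := hall a List.mem_cons_self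
    obtain ⟨h1, h2⟩ := IH s (fun x hx => hall x (List.mem_cons_of_mem _ hx))
    simp only [List.cons_append, List.takeWhile_cons_of_pos hpa, List.dropWhile_cons_of_pos hpa]
    exact ⟨by rw [h1], h2⟩

lemma runM_shift : ∀ (bs : List Int) (res : Int) (pool pre s : List (Int × Int)),
    (∀ x ∈ pre, ∀ c, bs.head? = some c → x.1 ≤ c) →
    runM res (pool ++ pre) s bs = runM res pool (pre ++ s) bs := by
  intro bs res pool pre s hpre
  cases bs with
  | nil => rfl
  | cons c cs =>
    simp only [runM, List.foldl_cons, stepM]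
    have hall : ∀ x ∈ pre, (fun g => decide (g.1 ≤ c)) x = true := by
      intro x hx
      simp only [decide_eq_true_eq]
      exact hpre x hx c rfl
    obtain ⟨h1, h2⟩ := takeWhile_append_all pre s hall
    rw [h1, h2, List.append_assoc]

lemma takeCap_none_iff : ∀ (caps : List Int) (w : Int),
    takeCap w caps = none ↔ ∀ c ∈ caps, c < w := by
  intro caps
  induction caps with
  | nil => intro w; simp [takeCap]
  | cons c rest IH =>
    intro w
    by_cases hc : w ≤ c
    · simp only [takeCap, if_pos hc]
      constructor
      · intro h; simp at h
      · intro h; exact absurd (h c List.mem_cons_self) (by omega)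
    · simp only [takeCap, if_neg hc]
      constructor
      · intro h x hx
        cases hr : takeCap w rest with
        | none =>
          rcases List.mem_cons.mp hx with h' | h'
          · omega
          · exact (IH w).mp hr x h'
        | some l => rw [hr] at h; simp at h
      · intro h
        have : takeCap w rest = none := (IH w).mpr (fun x hx => h x (List.mem_cons_of_mem _ hx))
        rw [this]
        rfl

lemma runM_drop_unreachable : ∀ (bags : List Int) (res : Int) (pool s : List (Int × Int))
    (g : Int × Int), s.Pairwise (fun x y => x.1 ≤ y.1) → g ∈ s → (∀ b ∈ bags, b < g.1) →
    runM res pool s bags = runM res pool (s.erase g) bags := by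
  intro bags
  induction bags with
  | nil => intro res pool s g _ _ _; rfl
  | cons bag bags IH =>
    intro res pool s g hsort hmem hlt
    have hbag : bag < g.1 := hlt bag List.mem_cons_self
    obtain ⟨h1, h2, h3⟩ := tw_erase_lt s g bag hsort hmem hbag
    simp only [runM, List.foldl_cons, stepM, h1, h2]
    have hsort2 : (s.dropWhile (fun x => decide (x.1 ≤ bag))).Pairwise (fun x y => x.1 ≤ y.1) :=
      List.Pairwise.sublist (List.dropWhile_sublist _) hsort
    cases hk : kleMin? (pool ++ s.takeWhile (fun g => decide (g.1 ≤ bag))) with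
    | none =>
      exact IH res _ _ g hsort2 h3 (fun b hb => hlt b (List.mem_cons_of_mem _ hb))
    | some m =>
      exact IH _ _ _ g hsort2 h3 (fun b hb => hlt b (List.mem_cons_of_mem _ hb))

lemma runM_extract : ∀ (bags : List Int) (res : Int) (pool s : List (Int × Int))
    (g : Int × Int) (bags' : List Int),
    bags.Pairwise (· ≤ ·) → s.Pairwise (fun x y => x.1 ≤ y.1) → g ∈ s →
    (∀ x ∈ pool, pyPairLt (key x) (key g) = false) →
    (∀ x ∈ s, pyPairLt (key x) (key g) = false) →
    takeCap g.1 bags = some bags' →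
    runM res pool s bags = g.2 + runM res pool (s.erase g) bags' := by
  intro bags
  induction bags with
  | nil => intro res pool s g bags' _ _ _ _ _ h; simp [takeCap] at h
  | cons b bs IH =>
    intro res pool s g bags' hbsort hsort hmem hminp hmins htc
    by_cases hb : g.1 ≤ b
    · rw [show takeCap g.1 (b :: bs) = some bs by simp [takeCap, hb]] at htc
      have hbags' : bags' = bs := by injection htc with h; exact h.symm
      subst bags'
      obtain ⟨hgtw, _, _⟩ := tw_erase_le s g b hsort hmem hb
      have hgp2 : g ∈ pool ++ s.takeWhile (fun x => decide (x.1 ≤ b)) :=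
        List.mem_append_right _ hgtw
      obtain ⟨m, hm⟩ : ∃ m, kleMin? (pool ++ s.takeWhile (fun x => decide (x.1 ≤ b))) = some m := by
        cases hk : kleMin? (pool ++ s.takeWhile (fun x => decide (x.1 ≤ b))) with
        | none =>
          rw [kleMin?_eq_none_iff] at hk
          rw [hk] at hgp2
          simp at hgp2
        | some m => exact ⟨m, rfl⟩
      have hmg : m = g := by
        obtain ⟨hmmem, hmin⟩ := kleMin?_spec hm
        have h1 : pyPairLt (key g) (key m) = false := hmin g hgp2
        have h2 : pyPairLt (key m) (key g) = false := by
          rcases List.mem_append.mp hmmem with h | h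
          · exact hminp m h
          · exact hmins m ((List.takeWhile_sublist _).subset h)
        exact key_inj (nplt_antisymm h2 h1)
      simp only [runM, List.foldl_cons, stepM, hm]
      subst hmg
      -- pool₂.erase m ~ pool ++ (takeWhile).erase m
      have hperm1 : ((pool ++ s.takeWhile (fun x => decide (x.1 ≤ b))).erase m).Perm
          (pool ++ (s.takeWhile (fun x => decide (x.1 ≤ b))).erase m) := by
        have h1 : (s.takeWhile (fun x => decide (x.1 ≤ b))).Perm
            (m :: (s.takeWhile (fun x => decide (x.1 ≤ b))).erase m) := List.perm_cons_erase hgtw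
        have h2 : (pool ++ s.takeWhile (fun x => decide (x.1 ≤ b))).Perm
            (m :: (pool ++ (s.takeWhile (fun x => decide (x.1 ≤ b))).erase m)) := by
          refine (List.Perm.append_left pool h1).trans ?_
          exact List.perm_middle
        have := h2.erase m
        rw [List.erase_cons_head] at this
        exact this
      rw [← runM]
      rw [runM_congr bs _ _ _ _ hperm1]
      have hshift := runM_shift bs (res + m.2) pool
        ((s.takeWhile (fun x => decide (x.1 ≤ b))).erase m)
        (s.dropWhile (fun x => decide (x.1 ≤ b))) ?hpre
      case hpre =>
        intro x hx c hc
        have hxtw : x ∈ s.takeWhile (fun x => decide (x.1 ≤ b)) :=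
          List.mem_of_mem_erase hx
        have hxb : x.1 ≤ b := by
          have := List.mem_takeWhile_imp hxtw
          simpa using this
        have hbc : b ≤ c := by
          cases bs with
          | nil => simp at hc
          | cons c0 cs0 =>
            simp only [List.head?_cons, Option.some.injEq] at hc
            have := (List.pairwise_cons.mp hbsort).1 c0 List.mem_cons_self
            omega
        omega
      rw [hshift]
      -- the erased-prefix stream is exactly s.erase m
      obtain ⟨_, he1, he2⟩ := tw_erase_le s m b hsort hmem hb
      have hstream : (s.takeWhile (fun x => decide (x.1 ≤ b))).erase m ++
          s.dropWhile (fun x => decide (x.1 ≤ b)) = s.erase m := by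
        rw [← he1, ← he2]
        exact List.takeWhile_append_dropWhile
      rw [hstream]
      have hfold : (List.foldl stepM (res, pool, s.erase m) bs).1 = runM res pool (s.erase m) bs := rfl
      rw [hfold, runM_add bs (res + m.2), runM_add bs res]
      omega
    · rw [show takeCap g.1 (b :: bs) = (takeCap g.1 bs).map (fun l => b :: l) by
        simp [takeCap, hb]] at htc
      rw [Option.map_eq_some_iff] at htc
      obtain ⟨bs', hbs', hcons⟩ := htc
      subst hcons
      obtain ⟨h1, h2, h3⟩ := tw_erase_lt s g b hsort hmem (by omega)
      simp only [runM, List.foldl_cons, stepM, h1, h2]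
      have hsort2 : (s.dropWhile (fun x => decide (x.1 ≤ b))).Pairwise (fun x y => x.1 ≤ y.1) :=
        List.Pairwise.sublist (List.dropWhile_sublist _) hsort
      have hbsort2 : bs.Pairwise (· ≤ ·) := (List.pairwise_cons.mp hbsort).2
      have hmins2 : ∀ x ∈ s.dropWhile (fun x => decide (x.1 ≤ b)),
          pyPairLt (key x) (key g) = false := fun x hx =>
        hmins x ((List.dropWhile_sublist _).subset hx)
      cases hk : kleMin? (pool ++ s.takeWhile (fun g => decide (g.1 ≤ b))) with
      | none =>
        have hminp2 : ∀ x ∈ pool ++ s.takeWhile (fun x => decide (x.1 ≤ b)),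
            pyPairLt (key x) (key g) = false := by
          intro x hx
          rcases List.mem_append.mp hx with h | h
          · exact hminp x h
          · exact hmins x ((List.takeWhile_sublist _).subset h)
        exact IH res _ _ g bs' hbsort2 hsort2 h3 hminp2 hmins2 hbs'
      | some m =>
        have hminp2 : ∀ x ∈ (pool ++ s.takeWhile (fun x => decide (x.1 ≤ b))).erase m,
            pyPairLt (key x) (key g) = false := by
          intro x hx
          rcases List.mem_append.mp (List.mem_of_mem_erase hx) with h | h
          · exact hminp x h
          · exact hmins x ((List.takeWhile_sublist _).subset h)
        exact IH _ _ _ g bs' hbsort2 hsort2 h3 hminp2 hmins2 hbs'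

lemma runM_nil : ∀ (bags : List Int) (res : Int), runM res [] [] bags = res := by
  intro bags
  induction bags with
  | nil => intro res; rfl
  | cons bag bags IH =>
    intro res
    simp only [runM, List.foldl_cons, stepM]
    simp only [List.takeWhile_nil, List.dropWhile_nil, List.append_nil]
    rw [show kleMin? [] = none from rfl]
    exact IH res

lemma runM_eq_runB : ∀ (os gs : List (Int × Int)) (bags : List Int),
    os.Perm gs → os.Pairwise (fun a b => pyPairLt (key b) (key a) = false) →
    gs.Pairwise (fun x y => x.1 ≤ y.1) → bags.Pairwise (· ≤ ·) →
    runM 0 [] gs bags = runB os bags := by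
  intro os
  induction os with
  | nil =>
    intro gs bags hperm _ _ _
    have : gs = [] := hperm.symm.eq_nil
    subst this
    rw [runM_nil]
    rfl
  | cons g os' IH =>
    intro gs bags hperm hos hgs hbags
    have hgmem : g ∈ gs := hperm.mem_iff.mp List.mem_cons_self
    have hmins : ∀ x ∈ gs, pyPairLt (key x) (key g) = false := by
      intro x hx
      rcases List.mem_cons.mp (hperm.mem_iff.mpr hx) with h | h
      · rw [h]; exact plt_irrefl _
      · exact (List.pairwise_cons.mp hos).1 x h
    have hperm' : os'.Perm (gs.erase g) := by
      have := hperm.erase g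
      rw [List.erase_cons_head] at this
      exact this
    have hos' : os'.Pairwise (fun a b => pyPairLt (key b) (key a) = false) :=
      (List.pairwise_cons.mp hos).2
    have hgs' : (gs.erase g).Pairwise (fun x y => x.1 ≤ y.1) :=
      List.Pairwise.sublist List.erase_sublist hgs
    cases htc : takeCap g.1 bags with
    | none =>
      have hlt : ∀ b ∈ bags, b < g.1 := (takeCap_none_iff bags g.1).mp htc
      rw [runM_drop_unreachable bags 0 [] gs g hgs hgmem hlt]
      rw [IH (gs.erase g) bags hperm' hos' hgs' hbags]
      simp [runB, htc]
    | some bags' =>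
      rw [runM_extract bags 0 [] gs g bags' hbags hgs hgmem (by simp) hmins htc]
      rw [IH (gs.erase g) bags' hperm' hos' hgs'
        (List.Pairwise.sublist (takeCap_sublist bags g.1 bags' htc) hbags)]
      simp [runB, htc]

-- ---- ordering facts about the Python sorts used by both ports ----

lemma insertBy_pairwise {before : (Int × Int) → (Int × Int) → Bool}
    (hasymm : ∀ a b, before a b = true → before b a = false)
    (htrans : ∀ a b c, before b a = false → before c b = false → before c a = false) :
    ∀ (acc : List (Int × Int)) (x : Int × Int),
    acc.Pairwise (fun a b => before b a = false) →
    (PySem.List.insertBy before x acc).Pairwise (fun a b => before b a = false) := by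
  intro acc
  induction acc with
  | nil => intro x _; simp [PySem.List.insertBy]
  | cons y ys IH =>
    intro x hp
    have hdef : PySem.List.insertBy before x (y :: ys) =
        if before x y = true then x :: y :: ys else y :: PySem.List.insertBy before x ys := rfl
    rw [hdef]
    by_cases hxy : before x y = true
    · rw [if_pos hxy]
      refine List.pairwise_cons.mpr ⟨?_, hp⟩
      intro z hz
      rcases List.mem_cons.mp hz with h | h
      · rw [h]; exact hasymm _ _ hxy
      · exact htrans x y z (hasymm _ _ hxy) ((List.pairwise_cons.mp hp).1 z h)
    · rw [if_neg hxy]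
      refine List.pairwise_cons.mpr ⟨?_, IH x (List.pairwise_cons.mp hp).2⟩
      intro z hz
      rcases (PySem.List.mem_insertBy before x z ys).mp hz with h | h
      · rw [h]; exact Bool.not_eq_true _ ▸ (by simpa using hxy)
      · exact (List.pairwise_cons.mp hp).1 z h

lemma foldl_insertBy_pairwise {before : (Int × Int) → (Int × Int) → Bool}
    (hasymm : ∀ a b, before a b = true → before b a = false)
    (htrans : ∀ a b c, before b a = false → before c b = false → before c a = false)
    (xs : List (Int × Int)) :
    (xs.foldl (fun acc x => PySem.List.insertBy before x acc) []).Pairwise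
      (fun a b => before b a = false) := by
  suffices h : ∀ (acc : List (Int × Int)), acc.Pairwise (fun a b => before b a = false) →
      (xs.foldl (fun acc x => PySem.List.insertBy before x acc) acc).Pairwise
        (fun a b => before b a = false) from h [] (by simp)
  induction xs with
  | nil => intro acc hacc; exact hacc
  | cons x xs IHx =>
    intro acc hacc
    exact IHx _ (insertBy_pairwise hasymm htrans acc x hacc)

lemma before_eq_plt (a b : Int × Int) :
    (decide (a.1 < b.1) || (!decide (b.1 < a.1) && decide (a.2 < b.2))) = pyPairLt a b := by
  rw [Bool.eq_iff_iff]
  simp only [pyPairLt, Bool.or_eq_true, Bool.and_eq_true, Bool.not_eq_eq_eq_not, Bool.not_true,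
    decide_eq_true_eq, decide_eq_false_iff_not, beq_iff_eq]
  omega

lemma before_eq_plt_key (a b : Int × Int) :
    (decide (-a.2 < -b.2) || (!decide (-b.2 < -a.2) && decide (a.1 < b.1))) =
      pyPairLt (key a) (key b) := by
  rw [Bool.eq_iff_iff]
  simp only [pyPairLt, key, Bool.or_eq_true, Bool.and_eq_true, Bool.not_eq_eq_eq_not,
    Bool.not_true, decide_eq_true_eq, decide_eq_false_iff_not, beq_iff_eq]
  omega

lemma gemsS_pairwise (xs : List (Int × Int)) :
    (PySem.List.sorted2 xs (fun g => g.1) (fun g => g.2)).Pairwise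
      (fun a b => pyPairLt b a = false) := by
  have h := foldl_insertBy_pairwise
    (before := fun a b : Int × Int => decide (a.1 < b.1) || (!decide (b.1 < a.1) && decide (a.2 < b.2)))
    (fun a b hab => by dsimp only at hab ⊢; rw [before_eq_plt] at hab ⊢; exact plt_asymm hab)
    (fun a b c h1 h2 => by dsimp only at h1 h2 ⊢; rw [before_eq_plt] at h1 h2 ⊢; exact nplt_trans h1 h2)
    xs
  have hdef : PySem.List.sorted2 xs (fun g => g.1) (fun g => g.2) =
      xs.foldl (fun acc x => PySem.List.insertBy
        (fun a b : Int × Int => decide (a.1 < b.1) || (!decide (b.1 < a.1) && decide (a.2 < b.2))) x acc) [] := rfl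
  rw [hdef]
  exact h.imp (fun {a b} hab => by rw [← before_eq_plt]; exact hab)

lemma order_pairwise (xs : List (Int × Int)) :
    (PySem.List.sorted2 xs (fun g => -g.2) (fun g => g.1)).Pairwise
      (fun a b => pyPairLt (key b) (key a) = false) := by
  have h := foldl_insertBy_pairwise
    (before := fun a b : Int × Int => decide (-a.2 < -b.2) || (!decide (-b.2 < -a.2) && decide (a.1 < b.1)))
    (fun a b hab => by dsimp only at hab ⊢; rw [before_eq_plt_key] at hab ⊢; exact plt_asymm hab)
    (fun a b c h1 h2 => by dsimp only at h1 h2 ⊢; rw [before_eq_plt_key] at h1 h2 ⊢; exact nplt_trans h1 h2)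
    xs
  have hdef : PySem.List.sorted2 xs (fun g => -g.2) (fun g => g.1) =
      xs.foldl (fun acc x => PySem.List.insertBy
        (fun a b : Int × Int => decide (-a.2 < -b.2) || (!decide (-b.2 < -a.2) && decide (a.1 < b.1))) x acc) [] := rfl
  rw [hdef]
  exact h.imp (fun {a b} hab => by rw [← before_eq_plt_key]; exact hab)

lemma plt_false_imp_wle {a b : Int × Int} (h : pyPairLt b a = false) : a.1 ≤ b.1 := by
  rcases a with ⟨a1, a2⟩; rcases b with ⟨b1, b2⟩
  simp only [pyPairLt, Bool.or_eq_false_iff, Bool.and_eq_false_iff, decide_eq_false_iff_not,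
    beq_eq_false_iff_ne, ne_eq] at h
  omega

lemma main_equal (N K : Int) (gems : List (Int × Int)) (knapsack : List Int) :
    solve N K gems knapsack = solve_alt N K gems knapsack := by
  unfold solve solve_alt
  simp only []
  have hslice : PySem.List.slice (PySem.List.sorted2 gems (fun g => g.1) (fun g => g.2)) none
      (some (max N 0)) =
      (PySem.List.sorted2 gems (fun g => g.1) (fun g => g.2)).take (max N 0).toNat :=
    PySem.List.slice_to _ (le_max_right N 0)
  rw [hslice]
  rw [foldA_eq_runM N _ (PySem.List.sorted knapsack (fun x => x)) 0 [] [] 0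
    ((PySem.List.sorted2 gems (fun g => g.1) (fun g => g.2)).take (max N 0).toNat)
    (le_refl 0) (by simp) (by simp) (by intro i j hj hc; simp at hj)]
  rw [foldB_eq_runB _ _ _ (PySem.List.sorted_pairwise knapsack (fun x => x))]
  rw [runM_eq_runB _ _ _ (PySem.List.sorted2_perm
    ((PySem.List.sorted2 gems (fun g => g.1) (fun g => g.2)).take (max N 0).toNat)
    (fun g => -g.2) (fun g => g.1) false) ?hkle ?hwle ?hbags]
  · omega
  case hkle => exact order_pairwise _
  case hwle =>
    exact (List.Pairwise.sublist (List.take_sublist _ _) (gemsS_pairwise gems)).imp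
      (fun {a b} hab => plt_false_imp_wle hab)
  case hbags =>
    exact PySem.List.sorted_pairwise knapsack (fun x => x)

-- ===== VERDICT (by name: the statement is the Claim_ definition above) =====
theorem solve_spec : Claim_equal_solve := by
  intro N K gems knapsack _hdom _hpre
  unfold Spec_solve
  exact main_equal N K gems knapsack

@[simp] theorem solve_raises : Claim_raises_solve := by
  unfold Claim_raises_solve
  refine ⟨?_, by decide⟩
  intro N K gems knapsack _hdom hr hpre
  obtain ⟨h1, h2, h3⟩ := hr
  rcases hpre with h | h | ⟨g, hg, hb⟩
  · omega
  · exact h2 h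
  · obtain ⟨b, hbmem, hle⟩ := h3 g hg
    exact absurd hle (not_le.mpr (hb b hbmem))
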